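-- pv_equiv track=rewrite | github.com/threedlite/diodorus | scripts/pipeline/align.py | try_cts_match
-- ===== SOURCE A (Python) =====
-- def try_cts_match(greek_secs, english_secs):
--     """Try to match Greek sections to English sections by CTS reference numbers.
--
--     Tries: exact match, parent match (book.chapter.section → book.chapter),
--     split variants (parent.0, parent.1), and prefix match (book.X).
--
--     Returns dict mapping greek_sec_idx → english_sec_idx.
--     """
--     en_by_ref = {}
--     # Also index by split_from for sections that were split by the pipeline
--     en_by_split_from = {}
--     for i, s in enumerate(english_secs):
--         en_by_ref[s.get("cts_ref", "")] = i
--         split_from = s.get("split_from")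
--         if split_from and split_from not in en_by_split_from:
--             en_by_split_from[split_from] = i  # first split piece
--
--     matches = {}
--     for gi, gs in enumerate(greek_secs):
--         ref = gs.get("cts_ref", "")
--         parts = ref.split(".")
--
--         # Exact match — if the English section was split by the pipeline,
--         # redirect to the first split piece so all Greek sub-sections
--         # consolidate onto one English target for refinement.
--         if ref in en_by_ref:
--             ei = en_by_ref[ref]
--             sf = english_secs[ei].get("split_from")
--             if sf and sf in en_by_split_from:
--                 matches[gi] = en_by_split_from[sf]
--             else:
--                 matches[gi] = ei
--             continue
--
--         # Parent match (book.chapter.section → book.chapter)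
--         if len(parts) >= 3:
--             parent = ".".join(parts[:-1])
--             if parent in en_by_ref:
--                 matches[gi] = en_by_ref[parent]
--                 continue
--             # Parent was split by pipeline — look up by split_from
--             if parent in en_by_split_from:
--                 matches[gi] = en_by_split_from[parent]
--                 continue
--
--         # Split-variant match: the full Greek ref was split
--         if ref in en_by_split_from:
--             matches[gi] = en_by_split_from[ref]
--             continue
--
--         # Prefix match (first two components)
--         if len(parts) >= 2:
--             prefix = ".".join(parts[:2])
--             if prefix in en_by_ref:
--                 matches[gi] = en_by_ref[prefix]
--                 continue
--
--         # Chapter-sibling match: for 3-part refs like 11.8.2, find all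
--         # English sections in the same chapter (11.8.*). If there's exactly
--         # one, map to it — no ambiguity. This handles the common case where
--         # Greek has sub-sections (11.8.1-5) but English has just one (11.8.1).
--         if len(parts) >= 3:
--             chapter_prefix = ".".join(parts[:2]) + "."
--             siblings = [r for r in en_by_ref if r.startswith(chapter_prefix)]
--             if len(siblings) == 1:
--                 matches[gi] = en_by_ref[siblings[0]]
--                 continue
--
--     # Remove crossings: if Greek order and English order disagree,
--     # fix the crossing by adjusting the English index to be monotonic.
--     # A crossing is: gi1 < gi2 but matches[gi1] > matches[gi2].
--     sorted_gi = sorted(matches.keys())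
--     max_en = -1
--     for gi in sorted_gi:
--         ei = matches[gi]
--         if ei < max_en:
--             # Crossing — adjust to match the previous English position
--             matches[gi] = max_en
--         else:
--             max_en = ei
--
--     return matches
-- ===== SOURCE B (Python) =====
-- def _chapter_key(ref):
--     """Chapter prefix 'a.b.' of a ref with >= 3 dot-components, else None."""
--     ps = ref.split(".")
--     if len(ps) >= 3:
--         return ps[0] + "." + ps[1] + "."
--     return None
--
--
-- def try_cts_match(greek_secs, english_secs):
--     """Match Greek sections to English sections by CTS reference numbers.
--
--     Same result as the original, but the chapter-sibling lookup uses a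
--     chapter-prefix index built once (O(G+E) instead of O(G*E)).
--     """
--     en_by_ref = {}
--     en_by_split_from = {}
--     for i, s in enumerate(english_secs):
--         en_by_ref[s.get("cts_ref", "")] = i
--         sf = s.get("split_from")
--         if sf and sf not in en_by_split_from:
--             en_by_split_from[sf] = i
--
--     # chapter index: 'a.b.' -> indices of English refs in that chapter
--     chap = {}
--     for r, ei in en_by_ref.items():
--         ck = _chapter_key(r)
--         if ck is not None:
--             chap.setdefault(ck, []).append(ei)
--
--     def match_one(gs):
--         ref = gs.get("cts_ref", "")
--         parts = ref.split(".")
--         if ref in en_by_ref: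
--             ei = en_by_ref[ref]
--             sf = english_secs[ei].get("split_from")
--             if sf and sf in en_by_split_from:
--                 return en_by_split_from[sf]
--             return ei
--         if len(parts) >= 3:
--             parent = ".".join(parts[:-1])
--             if parent in en_by_ref:
--                 return en_by_ref[parent]
--             if parent in en_by_split_from:
--                 return en_by_split_from[parent]
--         if ref in en_by_split_from:
--             return en_by_split_from[ref]
--         if len(parts) >= 2:
--             prefix = ".".join(parts[:2])
--             if prefix in en_by_ref:
--                 return en_by_ref[prefix]
--         if len(parts) >= 3:
--             sibs = chap.get(parts[0] + "." + parts[1] + ".", [])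
--             if len(sibs) == 1:
--                 return sibs[0]
--         return None
--
--     pairs = []
--     for gi, gs in enumerate(greek_secs):
--         ei = match_one(gs)
--         if ei is not None:
--             pairs.append((gi, ei))
--
--     # make English indices monotonic in one pass over the ordered pairs
--     res = {}
--     max_en = -1
--     for gi, ei in pairs:
--         if ei < max_en:
--             ei = max_en
--         else:
--             max_en = ei
--         res[gi] = ei
--     return res
-- ===== Notes on version B (the rewrite author's own statement) =====
-- stated objective: alternative
-- what changed: B precomputes a chapter-prefix index (dict 'a.b.' -> list of English indices) once, replacing A's per-Greek-section linear scan of all English refs in the sibling-match branch, and restructures matching as an Option-returning helper plus a single ordered pass that builds the result pairs directly instead of a dict rebuilt by key-sorting.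
import Mathlib
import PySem

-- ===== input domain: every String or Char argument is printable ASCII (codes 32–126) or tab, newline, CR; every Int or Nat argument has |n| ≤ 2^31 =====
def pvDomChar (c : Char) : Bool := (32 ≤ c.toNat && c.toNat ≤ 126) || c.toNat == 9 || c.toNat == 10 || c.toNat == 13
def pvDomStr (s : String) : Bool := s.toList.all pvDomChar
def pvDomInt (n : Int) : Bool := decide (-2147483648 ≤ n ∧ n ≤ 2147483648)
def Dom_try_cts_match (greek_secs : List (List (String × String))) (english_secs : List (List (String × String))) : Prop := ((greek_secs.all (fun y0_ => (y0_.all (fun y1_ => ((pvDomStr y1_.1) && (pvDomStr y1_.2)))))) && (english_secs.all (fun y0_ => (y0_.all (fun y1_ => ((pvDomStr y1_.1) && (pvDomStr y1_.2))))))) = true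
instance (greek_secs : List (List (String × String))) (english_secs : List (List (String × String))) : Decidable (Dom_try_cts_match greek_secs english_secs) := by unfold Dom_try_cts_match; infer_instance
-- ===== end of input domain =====

-- B replaces A.s per-Greek-section sibling scan over all English refs with a chapter-prefix index built once, and builds the result pairs in one ordered pass (a different algorithm of similar measured cost).


-- ===== PORT A =====
-- shared helpers: a Python dict literal `s` is the assoc list; `s.get(k, d)` / `s.get(k)`
def pvSecGetD (s : List (String × String)) (k dflt : String) : String := (PySem.Dict.mk s).getD k dflt
def pvSecGet? (s : List (String × String)) (k : String) : Option String := (PySem.Dict.mk s).get? k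

-- the first loop of BOTH Pythons: en_by_ref / en_by_split_from over enumerate(english_secs)
def pvEnIndex (english_secs : List (List (String × String))) : PySem.Dict String Int × PySem.Dict String Int :=
  (PySem.List.enumerate english_secs).foldl
    (fun st p =>
      (st.1.insert (pvSecGetD p.2 "cts_ref" "") p.1,
       match pvSecGet? p.2 "split_from" with
       | some sf => if sf ≠ "" ∧ st.2.contains sf = false then st.2.insert sf p.1 else st.2
       | none => st.2))
    (PySem.Dict.empty, PySem.Dict.empty)

-- A's matching loop (the `continue` chain flattened to an if-chain), then the crossing fix
def try_cts_match (greek_secs : List (List (String × String))) (english_secs : List (List (String × String))) : List (Int × Int) :=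
  let idx := pvEnIndex english_secs
  let enRef := idx.1
  let enSplit := idx.2
  let mtch := (PySem.List.enumerate greek_secs).foldl
    (fun m p =>
      let ref := pvSecGetD p.2 "cts_ref" ""
      let parts := (PySem.Str.split? ref ".").getD []   -- sep "." is nonempty: split never raises
      if enRef.contains ref then
        let ei := enRef.getD ref 0
        -- english_secs[ei]: ei is a stored enumerate index, always in range
        match pvSecGet? ((PySem.List.pyGet? english_secs ei).getD []) "split_from" with
        | some v => if v ≠ "" ∧ enSplit.contains v = true then m.insert p.1 (enSplit.getD v 0) else m.insert p.1 ei
        | none => m.insert p.1 ei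
      else if 3 ≤ parts.length ∧ enRef.contains (PySem.Str.join "." (PySem.List.slice parts none (some (-1)))) = true then
        m.insert p.1 (enRef.getD (PySem.Str.join "." (PySem.List.slice parts none (some (-1)))) 0)
      else if 3 ≤ parts.length ∧ enSplit.contains (PySem.Str.join "." (PySem.List.slice parts none (some (-1)))) = true then
        m.insert p.1 (enSplit.getD (PySem.Str.join "." (PySem.List.slice parts none (some (-1)))) 0)
      else if enSplit.contains ref then
        m.insert p.1 (enSplit.getD ref 0)
      else if 2 ≤ parts.length ∧ enRef.contains (PySem.Str.join "." (PySem.List.slice parts none (some 2))) = true then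
        m.insert p.1 (enRef.getD (PySem.Str.join "." (PySem.List.slice parts none (some 2))) 0)
      else if 3 ≤ parts.length then
        let cp := PySem.Str.join "." (PySem.List.slice parts none (some 2)) ++ "."
        let siblings := enRef.keys.filter (fun r => PySem.Str.startswith r cp)
        if siblings.length = 1 then m.insert p.1 (enRef.getD ((PySem.List.pyGet? siblings 0).getD "") 0) else m
      else m)
    PySem.Dict.empty
  let sortedGi := PySem.List.sorted mtch.keys (fun k => k)
  let fixed := sortedGi.foldl
    (fun st gi =>
      let ei := st.1.getD gi 0
      if ei < st.2 then (st.1.insert gi st.2, st.2) else (st.1, ei))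
    (mtch, (-1 : Int))
  fixed.1.items

-- ===== PORT B =====
def pvChapterKey? (ref : String) : Option String :=
  let ps := (PySem.Str.split? ref ".").getD []
  if 3 ≤ ps.length then
    some (((PySem.List.pyGet? ps 0).getD "") ++ "." ++ ((PySem.List.pyGet? ps 1).getD "") ++ ".")
  else none

-- chap: 'a.b.' -> indices of English refs in that chapter (setdefault(..,[]).append(ei) = modify)
def pvChapterIndex (enRef : PySem.Dict String Int) : PySem.Dict String (List Int) :=
  enRef.items.foldl
    (fun d p =>
      match pvChapterKey? p.1 with
      | some ck => d.modify ck [] (fun l => l ++ [p.2])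
      | none => d)
    PySem.Dict.empty

-- B's match_one: first matching rule, as an Option
def pvMatchOne (english_secs : List (List (String × String))) (enRef enSplit : PySem.Dict String Int)
    (chap : PySem.Dict String (List Int)) (gs : List (String × String)) : Option Int :=
  let ref := pvSecGetD gs "cts_ref" ""
  let parts := (PySem.Str.split? ref ".").getD []
  if enRef.contains ref then
    let ei := enRef.getD ref 0
    match pvSecGet? ((PySem.List.pyGet? english_secs ei).getD []) "split_from" with
    | some v => if v ≠ "" ∧ enSplit.contains v = true then some (enSplit.getD v 0) else some ei
    | none => some ei
  else if 3 ≤ parts.length ∧ enRef.contains (PySem.Str.join "." (PySem.List.slice parts none (some (-1)))) = true then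
    some (enRef.getD (PySem.Str.join "." (PySem.List.slice parts none (some (-1)))) 0)
  else if 3 ≤ parts.length ∧ enSplit.contains (PySem.Str.join "." (PySem.List.slice parts none (some (-1)))) = true then
    some (enSplit.getD (PySem.Str.join "." (PySem.List.slice parts none (some (-1)))) 0)
  else if enSplit.contains ref then
    some (enSplit.getD ref 0)
  else if 2 ≤ parts.length ∧ enRef.contains (PySem.Str.join "." (PySem.List.slice parts none (some 2))) = true then
    some (enRef.getD (PySem.Str.join "." (PySem.List.slice parts none (some 2))) 0)
  else if 3 ≤ parts.length then
    let sibs := chap.getD (((PySem.List.pyGet? parts 0).getD "") ++ "." ++ ((PySem.List.pyGet? parts 1).getD "") ++ ".") []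
    if sibs.length = 1 then some ((PySem.List.pyGet? sibs 0).getD 0) else none
  else none

def try_cts_match_alt (greek_secs : List (List (String × String))) (english_secs : List (List (String × String))) : List (Int × Int) :=
  let idx := pvEnIndex english_secs
  let chap := pvChapterIndex idx.1
  let pairs := (PySem.List.enumerate greek_secs).foldl
    (fun acc p =>
      match pvMatchOne english_secs idx.1 idx.2 chap p.2 with
      | some ei => acc ++ [(p.1, ei)]
      | none => acc)
    []
  let res := pairs.foldl
    (fun st q => if q.2 < st.2 then (st.1.insert q.1 st.2, st.2) else (st.1.insert q.1 q.2, q.2))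
    (PySem.Dict.empty, (-1 : Int))
  res.1.items

-- ===== PRECONDITION & SPEC =====
def Spec_try_cts_match (greek_secs : List (List (String × String))) (english_secs : List (List (String × String))) (out : List (Int × Int)) : Prop := out = try_cts_match_alt greek_secs english_secs
instance (greek_secs : List (List (String × String))) (english_secs : List (List (String × String))) (out : List (Int × Int)) : Decidable (Spec_try_cts_match greek_secs english_secs out) := by unfold Spec_try_cts_match; infer_instance

-- ===== CLAIM (what is proved, stated in full; the proofs are below) =====
def Claim_equal_try_cts_match : Prop := ∀ (greek_secs : List (List (String × String))) (english_secs : List (List (String × String))), Dom_try_cts_match greek_secs english_secs → Spec_try_cts_match greek_secs english_secs (try_cts_match greek_secs english_secs)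

-- ===== LEMMAS AND PROOFS =====

-- ---------- splitting on '.' : a structural model of PySem.Chars.splitOn · ['.'] ----------
def pvSplitDot : List Char → List (List Char)
  | [] => [[]]
  | c :: t =>
    if c = '.' then [] :: pvSplitDot t
    else match pvSplitDot t with
      | [] => [[c]]
      | h :: r => (c :: h) :: r

theorem pvSplitDot_ne_nil (l : List Char) : pvSplitDot l ≠ [] := by
  cases l with
  | nil => simp [pvSplitDot]
  | cons c t =>
    simp only [pvSplitDot]
    split
    · simp
    · split <;> simp

theorem pvSplitDot_cons_dot (t : List Char) : pvSplitDot ('.' :: t) = [] :: pvSplitDot t := by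
  simp [pvSplitDot]

theorem pvSplitDot_cons_ne (c : Char) (t : List Char) (hc : c ≠ '.') (h r) (ht : pvSplitDot t = h :: r) :
    pvSplitDot (c :: t) = (c :: h) :: r := by
  simp [pvSplitDot, hc, ht]

theorem pvGo_eq : ∀ (fuel : Nat) (l : List Char), l.length < fuel → ∀ (cur : List Char) (acc : List (List Char)),
    PySem.Chars.splitOn.go ['.'] fuel l cur acc
      = acc.reverse ++ ((cur.reverse ++ (pvSplitDot l).headD []) :: (pvSplitDot l).tail) := by
  intro fuel
  induction fuel with
  | zero => intro l h; omega
  | succ fuel ih =>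
    intro l h cur acc
    cases l with
    | nil => simp [PySem.Chars.splitOn.go, pvSplitDot]
    | cons c rest =>
      have hrest : rest.length < fuel := by simpa using h
      have hgo : PySem.Chars.splitOn.go ['.'] (fuel + 1) (c :: rest) cur acc
          = if (['.'] : List Char).isPrefixOf (c :: rest) then
              PySem.Chars.splitOn.go ['.'] fuel (List.drop (['.'] : List Char).length (c :: rest)) [] (cur.reverse :: acc)
            else PySem.Chars.splitOn.go ['.'] fuel rest (c :: cur) acc := rfl
      rw [hgo]
      obtain ⟨h', t', ht⟩ : ∃ h' t', pvSplitDot rest = h' :: t' := by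
        cases hx : pvSplitDot rest with
        | nil => exact absurd hx (pvSplitDot_ne_nil rest)
        | cons a b => exact ⟨a, b, rfl⟩
      by_cases hc : c = '.'
      · subst hc
        have hpre : (['.'] : List Char).isPrefixOf ('.' :: rest) = true := by
          simp [List.isPrefixOf]
        rw [if_pos hpre]
        have hd : List.drop (['.'] : List Char).length ('.' :: rest) = rest := rfl
        rw [hd, ih rest hrest]
        rw [pvSplitDot_cons_dot]
        simp [ht]
      · have hb : ('.' == c) = false := by
          rw [beq_eq_false_iff_ne]; exact fun hh => hc hh.symm
        have hpre : (['.'] : List Char).isPrefixOf (c :: rest) = false := by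
          simp [List.isPrefixOf, hb]
        rw [if_neg (by rw [hpre]; exact Bool.false_ne_true)]
        rw [ih rest hrest]
        rw [pvSplitDot_cons_ne c rest hc h' t' ht]
        simp [ht]

theorem pvSplitOn_eq (l : List Char) : PySem.Chars.splitOn l ['.'] = pvSplitDot l := by
  have hg := pvGo_eq (l.length + 1) l (by omega) [] []
  obtain ⟨h', t', ht⟩ : ∃ h' t', pvSplitDot l = h' :: t' := by
    cases hx : pvSplitDot l with
    | nil => exact absurd hx (pvSplitDot_ne_nil l)
    | cons a b => exact ⟨a, b, rfl⟩
  simpa [PySem.Chars.splitOn, ht] using hg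

theorem pvSplitDot_sep_free (l : List Char) : ∀ c ∈ pvSplitDot l, '.' ∉ c := by
  induction l with
  | nil => simp [pvSplitDot]
  | cons c t ih =>
    obtain ⟨h', t', ht⟩ : ∃ h' t', pvSplitDot t = h' :: t' := by
      cases hx : pvSplitDot t with
      | nil => exact absurd hx (pvSplitDot_ne_nil t)
      | cons a b => exact ⟨a, b, rfl⟩
    by_cases hc : c = '.'
    · subst hc
      rw [pvSplitDot_cons_dot]
      intro x hx
      rcases List.mem_cons.mp hx with h | h
      · subst h; simp
      · exact ih x h
    · rw [pvSplitDot_cons_ne c t hc h' t' ht]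
      intro x hxm
      rcases List.mem_cons.mp hxm with he | he
      · subst he
        intro hmem
        rcases List.mem_cons.mp hmem with h1 | h1
        · exact hc h1.symm
        · exact ih h' (by rw [ht]; exact List.mem_cons_self) h1
      · exact ih x (by rw [ht]; exact List.mem_cons_of_mem _ he)

theorem pvSplitDot_append_dot (a t : List Char) (ha : '.' ∉ a) :
    pvSplitDot (a ++ '.' :: t) = a :: pvSplitDot t := by
  induction a with
  | nil => simp [pvSplitDot_cons_dot]
  | cons x a' ih =>
    have hx : x ≠ '.' := by intro h; exact ha (by simp [h])
    have ha' : '.' ∉ a' := fun h => ha (List.mem_cons_of_mem _ h)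
    rw [List.cons_append]
    rw [pvSplitDot_cons_ne x (a' ++ '.' :: t) hx a' (pvSplitDot t) (ih ha')]

theorem pvIntercalate_cons_cons (sep a b : List Char) (r : List (List Char)) :
    List.intercalate sep (a :: b :: r) = a ++ sep ++ List.intercalate sep (b :: r) := by
  simp [List.intercalate, List.intersperse]

theorem pvSplitDot_intercalate (l : List Char) : List.intercalate ['.'] (pvSplitDot l) = l := by
  induction l with
  | nil => simp [pvSplitDot, List.intercalate]
  | cons c t ih =>
    obtain ⟨h', t', ht⟩ : ∃ h' t', pvSplitDot t = h' :: t' := by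
      cases hx : pvSplitDot t with
      | nil => exact absurd hx (pvSplitDot_ne_nil t)
      | cons a b => exact ⟨a, b, rfl⟩
    by_cases hc : c = '.'
    · subst hc
      rw [pvSplitDot_cons_dot, ht, pvIntercalate_cons_cons]
      rw [ht] at ih
      simp [ih]
    · rw [pvSplitDot_cons_ne c t hc h' t' ht]
      cases t' with
      | nil =>
        rw [ht] at ih
        simp [List.intercalate] at ih ⊢
        simp [ih]
      | cons y r' =>
        rw [pvIntercalate_cons_cons]
        rw [ht, pvIntercalate_cons_cons] at ih
        simp at ih ⊢
        simp [ih]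

theorem pvDotFreeInj (a c x y : List Char) (ha : '.' ∉ a) (hc : '.' ∉ c)
    (h : a ++ '.' :: x = c ++ '.' :: y) : a = c ∧ x = y := by
  induction a generalizing c with
  | nil =>
    cases c with
    | nil => simpa using h
    | cons z c' =>
      simp at h
      obtain ⟨h1, -⟩ := h
      exact absurd (by simp [← h1]) hc
  | cons w a' ih =>
    cases c with
    | nil =>
      simp at h
      obtain ⟨h1, -⟩ := h
      exact absurd (by simp [h1]) ha
    | cons z c' =>
      simp at h
      obtain ⟨h1, h2⟩ := h
      have hrec := ih c' (fun hm => ha (List.mem_cons_of_mem _ hm)) (fun hm => hc (List.mem_cons_of_mem _ hm)) h2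
      exact ⟨by simp [h1, hrec.1], hrec.2⟩

theorem pvPrefix_iff (a b r : List Char) (ha : '.' ∉ a) (hb : '.' ∉ b) :
    (a ++ '.' :: (b ++ ['.'])) <+: r ↔ 3 ≤ (pvSplitDot r).length ∧ (pvSplitDot r).take 2 = [a, b] := by
  constructor
  · rintro ⟨rest, hr⟩
    have hr' : r = a ++ '.' :: (b ++ '.' :: rest) := by
      rw [← hr]; simp
    rw [hr', pvSplitDot_append_dot a _ ha, pvSplitDot_append_dot b _ hb]
    obtain ⟨h', t', ht⟩ : ∃ h' t', pvSplitDot rest = h' :: t' := by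
      cases hx : pvSplitDot rest with
      | nil => exact absurd hx (pvSplitDot_ne_nil rest)
      | cons u v => exact ⟨u, v, rfl⟩
    simp [ht]
  · rintro ⟨h3, h2⟩
    obtain ⟨x0, x1, x2, u, hx⟩ : ∃ x0 x1 x2 u, pvSplitDot r = x0 :: x1 :: x2 :: u := by
      cases h : pvSplitDot r with
      | nil => exact absurd h (pvSplitDot_ne_nil r)
      | cons a0 l0 =>
        cases l0 with
        | nil => rw [h] at h3; simp at h3
        | cons a1 l1 =>
          cases l1 with
          | nil => rw [h] at h3; simp at h3
          | cons a2 l2 => exact ⟨a0, a1, a2, l2, rfl⟩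
    rw [hx] at h2
    simp at h2
    obtain ⟨rfl, rfl⟩ := h2
    have hrec := pvSplitDot_intercalate r
    rw [hx, pvIntercalate_cons_cons, pvIntercalate_cons_cons] at hrec
    refine ⟨List.intercalate ['.'] (x2 :: u), ?_⟩
    rw [← hrec]
    simp
-- ---------- String-level split facts ----------
theorem pvStrSplit_eq (s : String) : ∃ parts, PySem.Str.split? s "." = some parts ∧ parts.map String.toList = pvSplitDot s.toList := by
  have hb := PySem.Str.split?_map s "."
  have hdot : ("." : String).toList = ['.'] := by decide
  rw [hdot] at hb
  have hne : (['.'] : List Char).isEmpty = false := by decide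
  rw [PySem.Chars.split?, hne] at hb
  simp only [Bool.false_eq_true, if_false] at hb
  cases hsp : PySem.Str.split? s "." with
  | none => rw [hsp] at hb; simp at hb
  | some parts =>
    rw [hsp] at hb
    simp only [Option.map_some] at hb
    refine ⟨parts, rfl, ?_⟩
    rw [Option.some_inj.mp hb, pvSplitOn_eq]

theorem pvPyGet?_cons_zero {α : Type} (x : α) (l : List α) : PySem.List.pyGet? (x :: l) 0 = some x := by
  simp [PySem.List.pyGet?, PySem.List.pyIdx?]

theorem pvPyGet?_cons_one {α : Type} (x y : α) (l : List α) : PySem.List.pyGet? (x :: y :: l) 1 = some y := by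
  simp [PySem.List.pyGet?, PySem.List.pyIdx?]

theorem pvSlice_two {α : Type} (xs : List α) : PySem.List.slice xs none (some 2) = xs.take 2 := by
  have h := PySem.List.slice_to_natCast xs 2
  exact_mod_cast h

-- cp as a string:  "." .join(parts[:2]) + "."  =  parts[0] + "." + parts[1] + "."
theorem pvCp_eq (p0 p1 p2 : String) (t : List String) :
    PySem.Str.join "." (PySem.List.slice (p0 :: p1 :: p2 :: t) none (some 2)) ++ "."
      = ((PySem.List.pyGet? (p0 :: p1 :: p2 :: t) 0).getD "") ++ "." ++ ((PySem.List.pyGet? (p0 :: p1 :: p2 :: t) 1).getD "") ++ "." := by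
  rw [pvSlice_two, pvPyGet?_cons_zero, pvPyGet?_cons_one]
  have htake : List.take 2 (p0 :: p1 :: p2 :: t) = [p0, p1] := rfl
  rw [htake]
  apply String.toList_inj.mp
  have hdot : ("." : String).toList = ['.'] := by decide
  simp only [String.toList_append, PySem.Str.join, String.toList_ofList, PySem.Chars.join,
    List.map_cons, List.map_nil, Option.getD_some, hdot]
  rw [pvIntercalate_cons_cons]
  simp [List.intercalate]

theorem pvCpToList (p0 p1 : String) :
    (p0 ++ "." ++ p1 ++ "." : String).toList = p0.toList ++ '.' :: (p1.toList ++ ['.']) := by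
  have hdot : ("." : String).toList = ['.'] := by decide
  simp [String.toList_append, hdot]

-- ---------- chap characterization ----------
theorem pvChapFold_getD (items : List (String × Int)) (d : PySem.Dict String (List Int)) (cp : String) :
    (items.foldl (fun d p => match pvChapterKey? p.1 with
      | some ck => d.modify ck [] (fun l => l ++ [p.2])
      | none => d) d).getD cp []
    = d.getD cp [] ++ (items.filter (fun p => pvChapterKey? p.1 == some cp)).map (·.2) := by
  induction items generalizing d with
  | nil => simp
  | cons p rest ih =>
    simp only [List.foldl_cons, List.filter_cons]
    cases hck : pvChapterKey? p.1 with
    | none =>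
      rw [ih]
      simp
    | some ck =>
      rw [ih]
      by_cases hc : ck = cp
      · subst hc
        simp
      · simp [hc, Ne.symm hc, PySem.Dict.getD_modify]

-- the filter condition of A's sibling scan equals B's chapter-key condition
theorem pvCond_eq (r p0 p1 : String) (ha : '.' ∉ p0.toList) (hb : '.' ∉ p1.toList) :
    PySem.Str.startswith r (p0 ++ "." ++ p1 ++ ".") = (pvChapterKey? r == some (p0 ++ "." ++ p1 ++ ".")) := by
  obtain ⟨ps, hsp, hmap⟩ := pvStrSplit_eq r
  have hiff : PySem.Str.startswith r (p0 ++ "." ++ p1 ++ ".") = true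
      ↔ 3 ≤ (pvSplitDot r.toList).length ∧ (pvSplitDot r.toList).take 2 = [p0.toList, p1.toList] := by
    rw [PySem.Str.startswith_eq]
    rw [show (p0 ++ "." ++ p1 ++ "." : String).toList = p0.toList ++ '.' :: (p1.toList ++ ['.']) from pvCpToList p0 p1]
    rw [PySem.Chars.startswith_iff]
    exact pvPrefix_iff _ _ _ ha hb
  have hlen : (pvSplitDot r.toList).length = ps.length := by rw [← hmap, List.length_map]
  rw [pvChapterKey?]
  simp only [hsp, Option.getD_some]
  by_cases h3 : 3 ≤ ps.length
  · obtain ⟨q0, q1, q2, u, rfl⟩ : ∃ q0 q1 q2 u, ps = q0 :: q1 :: q2 :: u := by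
      cases ps with
      | nil => simp at h3
      | cons a0 l0 =>
        cases l0 with
        | nil => simp at h3
        | cons a1 l1 =>
          cases l1 with
          | nil => simp at h3
          | cons a2 l2 => exact ⟨a0, a1, a2, l2, rfl⟩
    rw [if_pos h3]
    have hq0 : '.' ∉ q0.toList := pvSplitDot_sep_free r.toList _ (by rw [← hmap]; simp)
    have hq1 : '.' ∉ q1.toList := pvSplitDot_sep_free r.toList _ (by rw [← hmap]; simp)
    have htake : (pvSplitDot r.toList).take 2 = [q0.toList, q1.toList] := by
      rw [← hmap]; rfl
    rw [pvPyGet?_cons_zero, pvPyGet?_cons_one]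
    simp only [Option.getD_some]
    by_cases heq : q0.toList = p0.toList ∧ q1.toList = p1.toList
    · obtain ⟨h0, h1⟩ := heq
      obtain rfl : q0 = p0 := String.toList_inj.mp h0
      obtain rfl : q1 = p1 := String.toList_inj.mp h1
      have hsw : PySem.Str.startswith r (q0 ++ "." ++ q1 ++ ".") = true :=
        hiff.mpr ⟨by omega, htake⟩
      rw [hsw]
      simp
    · have hsw : PySem.Str.startswith r (p0 ++ "." ++ p1 ++ ".") = false := by
        rw [← Bool.not_eq_true]
        intro hT
        obtain ⟨-, h2⟩ := hiff.mp hT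
        rw [htake] at h2
        simp at h2
        exact heq ⟨h2.1, h2.2⟩
      have hbq : ((some (q0 ++ "." ++ q1 ++ ".") : Option String) == some (p0 ++ "." ++ p1 ++ ".")) = false := by
        rw [beq_eq_false_iff_ne]
        intro hcon
        have hl := congrArg String.toList (Option.some_inj.mp hcon)
        rw [pvCpToList, pvCpToList] at hl
        obtain ⟨h1', h2'⟩ := pvDotFreeInj q0.toList p0.toList _ _ hq0 ha hl
        have h3' := (pvDotFreeInj q1.toList p1.toList [] [] hq1 hb (by simpa using h2')).1
        exact heq ⟨h1', h3'⟩
      rw [hsw, hbq]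
  · rw [if_neg h3]
    have hsw : PySem.Str.startswith r (p0 ++ "." ++ p1 ++ ".") = false := by
      rw [← Bool.not_eq_true]
      intro hT
      have hlen3 := (hiff.mp hT).1
      omega
    rw [hsw]
    simp

-- ---------- the sibling-branch equivalence ----------
theorem pvSib (enRef : PySem.Dict String Int) (hnd : enRef.keys.Nodup)
    (p0 p1 p2 : String) (t : List String)
    (ha : '.' ∉ p0.toList) (hb : '.' ∉ p1.toList) :
    (enRef.keys.filter (fun r => PySem.Str.startswith r (PySem.Str.join "." (PySem.List.slice (p0 :: p1 :: p2 :: t) none (some 2)) ++ "."))).map (fun r => enRef.getD r 0)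
      = (pvChapterIndex enRef).getD (((PySem.List.pyGet? (p0 :: p1 :: p2 :: t) 0).getD "") ++ "." ++ ((PySem.List.pyGet? (p0 :: p1 :: p2 :: t) 1).getD "") ++ ".") [] := by
  rw [pvCp_eq p0 p1 p2 t]
  rw [pvPyGet?_cons_zero, pvPyGet?_cons_one]
  simp only [Option.getD_some]
  rw [pvChapterIndex, pvChapFold_getD]
  have hemp : (PySem.Dict.empty : PySem.Dict String (List Int)).getD (p0 ++ "." ++ p1 ++ ".") [] = [] := by
    simp
  rw [hemp, List.nil_append]
  have hkeys : enRef.keys = enRef.items.map (·.1) := rfl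
  rw [hkeys, List.filter_map, List.map_map]
  have hfc : List.filter ((fun r => PySem.Str.startswith r (p0 ++ "." ++ p1 ++ ".")) ∘ (·.1)) enRef.items
      = List.filter (fun p => pvChapterKey? p.1 == some (p0 ++ "." ++ p1 ++ ".")) enRef.items := by
    apply List.filter_congr
    intro p _
    exact pvCond_eq p.1 p0 p1 ha hb
  rw [hfc]
  apply List.map_congr_left
  intro p hp
  have hmem := List.mem_filter.mp hp
  have hgd := PySem.Dict.getD_of_mem_items enRef (k := p.1) (v := p.2) (by simpa using hmem.1) hnd 0
  simpa using hgd
-- ---------- phase 1: A's match step equals 'apply B's match_one' ----------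
theorem pvStep (english_secs : List (List (String × String))) (enRef enSplit : PySem.Dict String Int)
    (hnd : enRef.keys.Nodup) (m : PySem.Dict Int Int) (p : Int × List (String × String)) :
    (let ref := pvSecGetD p.2 "cts_ref" ""
     let parts := (PySem.Str.split? ref ".").getD []
     if enRef.contains ref then
       let ei := enRef.getD ref 0
       match pvSecGet? ((PySem.List.pyGet? english_secs ei).getD []) "split_from" with
       | some v => if v ≠ "" ∧ enSplit.contains v = true then m.insert p.1 (enSplit.getD v 0) else m.insert p.1 ei
       | none => m.insert p.1 ei
     else if 3 ≤ parts.length ∧ enRef.contains (PySem.Str.join "." (PySem.List.slice parts none (some (-1)))) = true then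
       m.insert p.1 (enRef.getD (PySem.Str.join "." (PySem.List.slice parts none (some (-1)))) 0)
     else if 3 ≤ parts.length ∧ enSplit.contains (PySem.Str.join "." (PySem.List.slice parts none (some (-1)))) = true then
       m.insert p.1 (enSplit.getD (PySem.Str.join "." (PySem.List.slice parts none (some (-1)))) 0)
     else if enSplit.contains ref then
       m.insert p.1 (enSplit.getD ref 0)
     else if 2 ≤ parts.length ∧ enRef.contains (PySem.Str.join "." (PySem.List.slice parts none (some 2))) = true then
       m.insert p.1 (enRef.getD (PySem.Str.join "." (PySem.List.slice parts none (some 2))) 0)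
     else if 3 ≤ parts.length then
       let cp := PySem.Str.join "." (PySem.List.slice parts none (some 2)) ++ "."
       let siblings := enRef.keys.filter (fun r => PySem.Str.startswith r cp)
       if siblings.length = 1 then m.insert p.1 (enRef.getD ((PySem.List.pyGet? siblings 0).getD "") 0) else m
     else m)
    = (match pvMatchOne english_secs enRef enSplit (pvChapterIndex enRef) p.2 with
       | some ei => m.insert p.1 ei
       | none => m) := by
  simp only [pvMatchOne]
  by_cases h1 : enRef.contains (pvSecGetD p.2 "cts_ref" "") = true
  · rw [if_pos h1, if_pos h1]
    cases hsf : pvSecGet? ((PySem.List.pyGet? english_secs ((enRef.getD (pvSecGetD p.2 "cts_ref" "") 0))).getD []) "split_from" with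
    | none => rfl
    | some v =>
      by_cases hv : v ≠ "" ∧ enSplit.contains v = true
      · simp only [if_pos hv]
      · simp only [if_neg hv]
  · rw [if_neg h1, if_neg h1]
    obtain ⟨ps, hsp, hmap⟩ := pvStrSplit_eq (pvSecGetD p.2 "cts_ref" "")
    rw [hsp]
    simp only [Option.getD_some]
    by_cases h2 : 3 ≤ ps.length ∧ enRef.contains (PySem.Str.join "." (PySem.List.slice ps none (some (-1)))) = true
    · rw [if_pos h2, if_pos h2]
    · rw [if_neg h2, if_neg h2]
      by_cases h3 : 3 ≤ ps.length ∧ enSplit.contains (PySem.Str.join "." (PySem.List.slice ps none (some (-1)))) = true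
      · rw [if_pos h3, if_pos h3]
      · rw [if_neg h3, if_neg h3]
        by_cases h4 : enSplit.contains (pvSecGetD p.2 "cts_ref" "") = true
        · rw [if_pos h4, if_pos h4]
        · rw [if_neg h4, if_neg h4]
          by_cases h5 : 2 ≤ ps.length ∧ enRef.contains (PySem.Str.join "." (PySem.List.slice ps none (some 2))) = true
          · rw [if_pos h5, if_pos h5]
          · rw [if_neg h5, if_neg h5]
            by_cases h6 : 3 ≤ ps.length
            · rw [if_pos h6, if_pos h6]
              obtain ⟨p0, p1, p2, t, rfl⟩ : ∃ p0 p1 p2 t, ps = p0 :: p1 :: p2 :: t := by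
                cases ps with
                | nil => simp at h6
                | cons a0 l0 =>
                  cases l0 with
                  | nil => simp at h6
                  | cons a1 l1 =>
                    cases l1 with
                    | nil => simp at h6
                    | cons a2 l2 => exact ⟨a0, a1, a2, l2, rfl⟩
              have ha : '.' ∉ p0.toList := by
                apply pvSplitDot_sep_free ((pvSecGetD p.2 "cts_ref" "").toList)
                rw [← hmap]; simp
              have hb : '.' ∉ p1.toList := by
                apply pvSplitDot_sep_free ((pvSecGetD p.2 "cts_ref" "").toList)
                rw [← hmap]; simp
              have M := pvSib enRef hnd p0 p1 p2 t ha hb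
              by_cases hA : (enRef.keys.filter (fun r => PySem.Str.startswith r (PySem.Str.join "." (PySem.List.slice (p0 :: p1 :: p2 :: t) none (some 2)) ++ "."))).length = 1
              · obtain ⟨r, hr⟩ := List.length_eq_one_iff.mp hA
                rw [if_pos hA, hr]
                rw [hr] at M
                simp only [List.map_cons, List.map_nil] at M
                rw [← M]
                rw [pvPyGet?_cons_zero, pvPyGet?_cons_zero]
                rfl
              · rw [if_neg hA]
                have hB : ¬ ((pvChapterIndex enRef).getD (((PySem.List.pyGet? (p0 :: p1 :: p2 :: t) 0).getD "") ++ "." ++ ((PySem.List.pyGet? (p0 :: p1 :: p2 :: t) 1).getD "") ++ ".") []).length = 1 := by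
                  rw [← M]
                  simpa using hA
                rw [if_neg hB]
            · rw [if_neg h6, if_neg h6]

-- ---------- phase 1: fold shapes ----------
theorem pvFoldOpt_append {β : Type} (mo : Int × β → Option Int) :
    ∀ (L : List (Int × β)) (acc : List (Int × Int)),
    L.foldl (fun acc p => match mo p with | some ei => acc ++ [(p.1, ei)] | none => acc) acc
      = acc ++ L.flatMap (fun p => match mo p with | some ei => [(p.1, ei)] | none => []) := by
  intro L
  induction L with
  | nil => simp
  | cons p L ih =>
    intro acc
    cases h : mo p with
    | none => simp only [List.foldl_cons, h, List.flatMap_cons]; rw [ih]; simp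
    | some ei => simp only [List.foldl_cons, h, List.flatMap_cons]; rw [ih]; simp

theorem pvFoldIns_items {β : Type} (mo : Int × β → Option Int) :
    ∀ (L : List (Int × β)) (m : PySem.Dict Int Int),
    (L.map (·.1)).Nodup → (∀ p ∈ L, m.contains p.1 = false) →
    (L.foldl (fun m p => match mo p with | some ei => m.insert p.1 ei | none => m) m).items
      = m.items ++ L.flatMap (fun p => match mo p with | some ei => [(p.1, ei)] | none => []) := by
  intro L
  induction L with
  | nil => simp
  | cons p L ih =>
    intro m hnd hfr
    rw [List.map_cons, List.nodup_cons] at hnd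
    obtain ⟨hp1, hndt⟩ := hnd
    cases h : mo p with
    | none =>
      simp only [List.foldl_cons, h, List.flatMap_cons]
      rw [ih m hndt (fun q hq => hfr q (List.mem_cons_of_mem _ hq))]
      simp
    | some ei =>
      simp only [List.foldl_cons, h, List.flatMap_cons]
      rw [ih (m.insert p.1 ei) hndt ?_]
      · rw [PySem.Dict.items_insert_of_not_contains m ei (hfr p List.mem_cons_self)]
        simp
      · intro q hq
        rw [PySem.Dict.contains_insert]
        have hne : (q.1 == p.1) = false := by
          rw [beq_eq_false_iff_ne]
          intro hc
          exact hp1 (by rw [← hc]; exact List.mem_map_of_mem hq)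
        rw [hne, hfr q (List.mem_cons_of_mem _ hq)]
        rfl

theorem pvFlat_fst_ge {β : Type} (mo : Int × β → Option Int) :
    ∀ (g : List β) (s : Int) (q : Int × Int),
    q ∈ (PySem.List.enumerate g s).flatMap (fun p => match mo p with | some ei => [(p.1, ei)] | none => []) → s ≤ q.1 := by
  intro g
  induction g with
  | nil => intro s q hq; simp [PySem.List.enumerate] at hq
  | cons x g ih =>
    intro s q hq
    rw [PySem.List.enumerate_cons, List.flatMap_cons] at hq
    rcases List.mem_append.mp hq with h | h
    · cases hm : mo (s, x) with
      | none => rw [hm] at h; simp at h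
      | some ei =>
        rw [hm] at h
        simp at h
        simp [h]
    · have := ih (s + 1) q h
      omega

theorem pvFlat_pairwise {β : Type} (mo : Int × β → Option Int) :
    ∀ (g : List β) (s : Int),
    ((PySem.List.enumerate g s).flatMap (fun p => match mo p with | some ei => [(p.1, ei)] | none => [])).Pairwise (fun a b => a.1 < b.1) := by
  intro g
  induction g with
  | nil => intro s; simp [PySem.List.enumerate]
  | cons x g ih =>
    intro s
    rw [PySem.List.enumerate_cons, List.flatMap_cons]
    apply List.pairwise_append.mpr
    refine ⟨?_, ih (s + 1), ?_⟩
    · cases hm : mo (s, x) <;> simp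
    · intro a ha b hb
      have hb' := pvFlat_fst_ge mo g (s + 1) b hb
      cases hm : mo (s, x) with
      | none => rw [hm] at ha; simp at ha
      | some ei =>
        rw [hm] at ha
        simp at ha
        have ha1 : a.1 = s := by rw [ha]
        omega

-- ---------- phase 2: the crossing fix on the dict equals the rebuild on the pairs ----------
theorem pvMapNoKey (l : List (Int × Int)) (k : Int) (v : Int) (h : ∀ p ∈ l, p.1 ≠ k) :
    l.map (fun p => if (p.1 == k) = true then (k, v) else p) = l := by
  induction l with
  | nil => rfl
  | cons p l ih =>
    have hp : (p.1 == k) = false := by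
      rw [beq_eq_false_iff_ne]; exact h p List.mem_cons_self
    simp only [List.map_cons, hp]
    rw [ih (fun q hq => h q (List.mem_cons_of_mem _ hq))]
    simp

theorem pvFix : ∀ (rest : List (Int × Int)) (res d : PySem.Dict Int Int) (mx : Int),
    d.items = res.items ++ rest → d.keys.Nodup →
    ((rest.map (·.1)).foldl (fun st gi =>
        let ei := st.1.getD gi 0
        if ei < st.2 then (st.1.insert gi st.2, st.2) else (st.1, ei)) (d, mx)).1.items
    = (rest.foldl (fun st q => if q.2 < st.2 then (st.1.insert q.1 st.2, st.2) else (st.1.insert q.1 q.2, q.2)) (res, mx)).1.items := by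
  intro rest
  induction rest with
  | nil => intro res d mx hitems _; simpa using hitems
  | cons q rest ih =>
    intro res d mx hitems hnd
    have hkeys : d.keys = res.keys ++ q.1 :: rest.map (·.1) := by
      show d.items.map (·.1) = res.items.map (·.1) ++ q.1 :: rest.map (·.1)
      rw [hitems]; simp
    have hnd2 : (q.1 :: (res.keys ++ rest.map (·.1))).Nodup := by
      have hperm : (res.keys ++ q.1 :: rest.map (·.1)).Perm (q.1 :: (res.keys ++ rest.map (·.1))) :=
        List.perm_middle
      exact hperm.nodup (by rw [← hkeys]; exact hnd)
    have hqres : q.1 ∉ res.keys := fun hc =>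
      (List.nodup_cons.mp hnd2).1 (List.mem_append.mpr (Or.inl hc))
    have hqrest : q.1 ∉ rest.map (·.1) := fun hc =>
      (List.nodup_cons.mp hnd2).1 (List.mem_append.mpr (Or.inr hc))
    have hqmem : (q.1, q.2) ∈ d.items := by rw [hitems]; simp
    have hgd : d.getD q.1 0 = q.2 := PySem.Dict.getD_of_mem_items d hqmem hnd 0
    have hcont : d.contains q.1 = true := by
      rw [PySem.Dict.contains_eq_decide_mem_keys]
      simp [hkeys]
    have hrescont : res.contains q.1 = false := by
      rw [PySem.Dict.contains_eq_decide_mem_keys]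
      simpa using hqres
    have hresne : ∀ x ∈ res.items, x.1 ≠ q.1 := by
      intro x hx hc
      exact hqres (hc ▸ List.mem_map_of_mem hx)
    have hrestne : ∀ x ∈ rest, x.1 ≠ q.1 := by
      intro x hx hc
      exact hqrest (hc ▸ List.mem_map_of_mem hx)
    simp only [List.map_cons, List.foldl_cons, hgd]
    by_cases hlt : q.2 < mx
    · rw [if_pos hlt, if_pos hlt]
      have hins : (d.insert q.1 mx).items = (res.insert q.1 mx).items ++ rest := by
        rw [PySem.Dict.items_insert_of_contains d mx hcont,
            PySem.Dict.items_insert_of_not_contains res mx hrescont, hitems]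
        rw [List.map_append, List.map_cons]
        rw [pvMapNoKey res.items q.1 mx hresne, pvMapNoKey rest q.1 mx hrestne]
        simp
      have hnd' : (d.insert q.1 mx).keys.Nodup := by
        have hk : (d.insert q.1 mx).keys = d.keys := by
          show (d.insert q.1 mx).items.map (·.1) = d.keys
          rw [hins, PySem.Dict.items_insert_of_not_contains res mx hrescont, hkeys]
          simp only [List.map_append, List.map_cons, List.cons_append, List.append_assoc]
          rfl
        rw [hk]; exact hnd
      exact ih (res.insert q.1 mx) (d.insert q.1 mx) mx hins hnd'
    · rw [if_neg hlt, if_neg hlt]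
      apply ih (res.insert q.1 q.2) d q.2 ?_ hnd
      rw [PySem.Dict.items_insert_of_not_contains res q.2 hrescont, hitems]
      simp

-- ---------- pipeline: fold-insert + sort + fix on the dict = rebuild on the pairs list ----------
theorem pvPipeline {β : Type} (mo : Int × β → Option Int) (g : List β) :
    ((PySem.List.sorted ((List.foldl (fun m p => match mo p with | some ei => m.insert p.1 ei | none => m) PySem.Dict.empty (PySem.List.enumerate g)).keys) (fun k => k)).foldl
       (fun st gi => let ei := st.1.getD gi 0; if ei < st.2 then (st.1.insert gi st.2, st.2) else (st.1, ei))
       ((List.foldl (fun m p => match mo p with | some ei => m.insert p.1 ei | none => m) PySem.Dict.empty (PySem.List.enumerate g)), (-1 : Int))).1.items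
    = (((PySem.List.enumerate g).flatMap (fun p => match mo p with | some ei => [(p.1, ei)] | none => [])).foldl
       (fun st q => if q.2 < st.2 then (st.1.insert q.1 st.2, st.2) else (st.1.insert q.1 q.2, q.2))
       (PySem.Dict.empty, (-1 : Int))).1.items := by
  set MF := List.foldl (fun m p => match mo p with | some ei => m.insert p.1 ei | none => m) PySem.Dict.empty (PySem.List.enumerate g) with hMF
  set PB := (PySem.List.enumerate g).flatMap (fun p => match mo p with | some ei => [(p.1, ei)] | none => []) with hPB
  have hemp : (PySem.Dict.empty : PySem.Dict Int Int).items = [] := rfl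
  have hnodupL : ((PySem.List.enumerate g).map (·.1)).Nodup := by
    rw [PySem.List.map_fst_enumerate]
    exact PySem.List.nodup_pyRange_one _ _
  have hitems : MF.items = PB := by
    rw [hMF, hPB]
    rw [pvFoldIns_items mo (PySem.List.enumerate g) PySem.Dict.empty hnodupL (fun q _ => by simp)]
    rw [hemp, List.nil_append]
  have hkeys : MF.keys = PB.map (fun q => q.1) := by
    rw [← hitems]; rfl
  have hpw : PB.Pairwise (fun a b => a.1 < b.1) := by
    rw [hPB]; exact pvFlat_pairwise mo g 0
  have hpwk : (PB.map (fun q => q.1)).Pairwise (fun a b => a < b) := List.pairwise_map.mpr hpw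
  have hnod : MF.keys.Nodup := by
    rw [hkeys]; exact hpwk.imp (fun h => ne_of_lt h)
  have hsorted : PySem.List.sorted MF.keys (fun k => k) = MF.keys :=
    PySem.List.sorted_eq_of_perm_of_pairwise_lt _ _ _ (List.Perm.refl _) (by rw [hkeys]; exact hpwk)
  rw [hsorted, hkeys]
  exact pvFix PB PySem.Dict.empty MF (-1) (by rw [hitems, hemp, List.nil_append]) hnod

-- ---------- the english index: its first component is an insert loop with unique keys ----------
theorem pvFst_fold : ∀ (L : List (Int × List (String × String))) (a b : PySem.Dict String Int),
    ((L.foldl (fun st p =>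
        (st.1.insert (pvSecGetD p.2 "cts_ref" "") p.1,
         match pvSecGet? p.2 "split_from" with
         | some sf => if sf ≠ "" ∧ st.2.contains sf = false then st.2.insert sf p.1 else st.2
         | none => st.2)) (a, b)).1)
    = L.foldl (fun d p => d.insert (pvSecGetD p.2 "cts_ref" "") p.1) a := by
  intro L
  induction L with
  | nil => intro a b; rfl
  | cons p L ih =>
    intro a b
    simp only [List.foldl_cons]
    exact ih _ _

theorem pvEnRef_nodup (english_secs : List (List (String × String))) : (pvEnIndex english_secs).1.keys.Nodup := by
  rw [pvEnIndex, pvFst_fold]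
  exact PySem.Dict.nodup_keys_foldl_insert_key _
    (fun p : Int × List (String × String) => pvSecGetD p.2 "cts_ref" "")
    (fun d p => p.1) _ PySem.Dict.nodup_keys_empty

-- ===== VERDICT (by name: the statement is the Claim_ definition above) =====
theorem try_cts_match_spec : Claim_equal_try_cts_match := by
  intro g e _
  show try_cts_match g e = try_cts_match_alt g e
  simp only [try_cts_match, try_cts_match_alt]
  have hnd := pvEnRef_nodup e
  have hA := PySem.List.foldl_congr_mem'
    (l := PySem.List.enumerate g) (init := (PySem.Dict.empty : PySem.Dict Int Int))
    (h := fun (p : Int × List (String × String)) (_ : p ∈ PySem.List.enumerate g) (m : PySem.Dict Int Int) =>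
      pvStep e ((pvEnIndex e).1) ((pvEnIndex e).2) hnd m p)
  rw [hA, pvFoldOpt_append]
  simp only [List.nil_append]
  exact pvPipeline (fun p => pvMatchOne e ((pvEnIndex e).1) ((pvEnIndex e).2) (pvChapterIndex ((pvEnIndex e).1)) p.2) g
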